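-- pv_equiv track=rewrite | github.com/pypi-data/pypi-mirror-375 | packages/edges/edges-1.0.2.tar.gz/edges-1.0.2/edges/flow_matching.py | matches_classifications
-- ===== SOURCE A (Python) =====
-- def matches_classifications(cf_classifications, dataset_classifications):
--     """Match CF classification codes to dataset classifications."""
--
--     if isinstance(cf_classifications, dict):
--         cf_classifications = [
--             (scheme, code)
--             for scheme, codes in cf_classifications.items()
--             for code in codes
--         ]
--     elif isinstance(cf_classifications, (list, tuple)):
--         if all(
--             isinstance(x, tuple) and isinstance(x[1], (list, tuple))
--             for x in cf_classifications
--         ):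
--             # Convert from tuple of tuples like (('cpc', ('01.1',)),) -> [('cpc', '01.1')]
--             cf_classifications = [
--                 (scheme, code) for scheme, codes in cf_classifications for code in codes
--             ]
--
--     dataset_codes = [
--         (scheme, str(c).split(":")[0].strip())
--         for scheme, codes in dataset_classifications
--         for c in (codes if isinstance(codes, (list, tuple, set)) else [codes])
--     ]
--
--     for scheme, code in dataset_codes:
--         if any(
--             code.startswith(cf_code)
--             and scheme.lower().strip() == cf_scheme.lower().strip()
--             for cf_scheme, cf_code in cf_classifications
--         ):
--             return True
--     return False
-- ===== SOURCE B (Python) =====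
-- def matches_classifications(cf_classifications, dataset_classifications):
--     """Match CF classification codes to dataset classifications.
--
--     Different algorithm: build a set keyed by normalized scheme once, then test
--     each dataset code's prefixes for membership (no inner scan over CF pairs).
--     """
--     if isinstance(cf_classifications, dict):
--         cf_classifications = [
--             (scheme, code)
--             for scheme, codes in cf_classifications.items()
--             for code in codes
--         ]
--     index = {
--         (cf_scheme.lower().strip(), cf_code)
--         for cf_scheme, cf_code in cf_classifications
--     }
--     for scheme, codes in dataset_classifications:
--         if not isinstance(codes, (list, tuple, set)):
--             codes = [codes]
--         key = scheme.lower().strip()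
--         for c in codes:
--             code = str(c).split(":")[0].strip()
--             if any((key, code[:i]) in index for i in range(len(code) + 1)):
--                 return True
--     return False
-- ===== Notes on version B (the rewrite author's own statement) =====
-- stated objective: faster
-- what changed: Replaced the per-dataset-code linear scan over all CF pairs with a set of (normalized scheme, code) built once, querying each dataset code's prefixes for membership.
import Mathlib
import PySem

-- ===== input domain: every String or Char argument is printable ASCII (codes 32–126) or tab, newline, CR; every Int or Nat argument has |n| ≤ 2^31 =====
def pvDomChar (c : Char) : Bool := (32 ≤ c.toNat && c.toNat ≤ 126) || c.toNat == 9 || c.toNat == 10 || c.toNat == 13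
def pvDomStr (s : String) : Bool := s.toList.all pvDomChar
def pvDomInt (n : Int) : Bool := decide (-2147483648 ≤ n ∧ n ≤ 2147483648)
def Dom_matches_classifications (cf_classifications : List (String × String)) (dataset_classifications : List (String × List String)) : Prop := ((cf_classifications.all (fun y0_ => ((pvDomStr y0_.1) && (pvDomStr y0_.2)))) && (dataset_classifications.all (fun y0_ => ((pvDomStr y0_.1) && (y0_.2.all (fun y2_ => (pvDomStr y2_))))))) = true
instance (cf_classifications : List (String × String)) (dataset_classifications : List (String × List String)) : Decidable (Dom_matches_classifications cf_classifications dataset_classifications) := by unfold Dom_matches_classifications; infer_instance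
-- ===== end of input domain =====

-- B replaces the inner scan over CF pairs by a set of (normalized scheme, code) pairs
-- built once and queried with each dataset code's prefixes (objective: faster).


-- ===== PORT A =====
-- str(c).split(":")[0].strip()  (split with a nonempty separator never yields []; [0] ported as headD)
def pvCode (c : String) : String :=
  PySem.Str.strip (((PySem.Str.split? c ":").getD []).headD "")

-- scheme.lower().strip()
def pvNorm (s : String) : String :=
  PySem.Str.strip (PySem.Str.lower s)

-- the 'for scheme, code in dataset_codes: if any(...): return True' loop
def pvLoopA (cf : List (String × String)) : List (String × String) → Bool
  | [] => false
  | (scheme, code) :: rest =>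
    if cf.any (fun q => PySem.Str.startswith code q.2 && (pvNorm scheme == pvNorm q.1))
    then true
    else pvLoopA cf rest

-- Under the typed inputs (list of (str, str) pairs; dataset values lists of str) the
-- isinstance-driven conversions of cf_classifications leave it unchanged (on [] the
-- 'all' branch rebuilds []), and the 'codes if isinstance(...) else [codes]' always
-- takes the list branch; they are ported as identity, exact on this domain.
def matches_classifications (cf_classifications : List (String × String)) (dataset_classifications : List (String × List String)) : Bool :=
  let dataset_codes :=
    dataset_classifications.flatMap (fun p => p.2.map (fun c => (p.1, pvCode c)))
  pvLoopA cf_classifications dataset_codes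

-- ===== PORT B =====
def matches_classifications_alt (cf_classifications : List (String × String)) (dataset_classifications : List (String × List String)) : Bool :=
  let index : PySem.Set (String × String) :=
    PySem.Set.ofList (cf_classifications.map (fun q => (pvNorm q.1, q.2)))
  dataset_classifications.any (fun p =>
    let key := pvNorm p.1
    p.2.any (fun c =>
      let code := pvCode c
      (PySem.List.pyRange 0 ((PySem.Str.len code : Int) + 1)).any (fun i =>
        index.contains (key, PySem.Str.slice code none (some i)))))

-- ===== PRECONDITION & SPEC =====
def Spec_matches_classifications (cf_classifications : List (String × String)) (dataset_classifications : List (String × List String)) (out : Bool) : Prop := out = matches_classifications_alt cf_classifications dataset_classifications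
instance (cf_classifications : List (String × String)) (dataset_classifications : List (String × List String)) (out : Bool) : Decidable (Spec_matches_classifications cf_classifications dataset_classifications out) := by unfold Spec_matches_classifications; infer_instance

-- ===== CLAIM (what is proved, stated in full; the proofs are below) =====
def Claim_equal_matches_classifications : Prop := ∀ (cf_classifications : List (String × String)) (dataset_classifications : List (String × List String)), Dom_matches_classifications cf_classifications dataset_classifications → Spec_matches_classifications cf_classifications dataset_classifications (matches_classifications cf_classifications dataset_classifications)

-- ===== LEMMAS AND PROOFS =====

-- A's early-return loop is an 'any' over the remaining dataset codes
theorem pvLoopA_eq_any (cf : List (String × String)) (l : List (String × String)) :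
    pvLoopA cf l =
      l.any (fun x => cf.any (fun q => PySem.Str.startswith x.2 q.2 && (pvNorm x.1 == pvNorm q.1))) := by
  induction l with
  | nil => rfl
  | cons hd tl ih =>
    obtain ⟨s, c⟩ := hd
    simp only [pvLoopA, List.any_cons, ih]
    cases h : cf.any (fun q => PySem.Str.startswith c q.2 && (pvNorm s == pvNorm q.1)) <;> simp

-- some prefix code[:i], 0 ≤ i ≤ len(code), equals p  ↔  code.startswith(p)
theorem exists_slice_eq_iff_startswith (code p : String) :
    (∃ i ∈ PySem.List.pyRange 0 ((PySem.Str.len code : Int) + 1),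
        PySem.Str.slice code none (some i) = p)
      ↔ PySem.Str.startswith code p = true := by
  constructor
  · rintro ⟨i, hi, hs⟩
    rw [PySem.List.mem_pyRange_one] at hi
    obtain ⟨n, rfl⟩ : ∃ n : Nat, i = (n : Int) := ⟨i.toNat, (Int.toNat_of_nonneg hi.1).symm⟩
    have hn : n ≤ code.toList.length := by
      have h2 := hi.2
      rw [PySem.Str.len_eq] at h2
      omega
    have : (PySem.Str.slice code none (some (n : Int))).toList = code.toList.take n := by
      simp [pysem]
    have hpl : p.toList = code.toList.take n := by rw [← hs, this]
    simp only [PySem.Str.startswith_eq, PySem.Chars.startswith_iff]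
    rw [hpl]; exact List.take_prefix n code.toList
  · intro h
    simp only [PySem.Str.startswith_eq, PySem.Chars.startswith_iff] at h
    refine ⟨(p.toList.length : Int), ?_, ?_⟩
    · rw [PySem.List.mem_pyRange_one, PySem.Str.len_eq]
      have hle := h.length_le
      omega
    · have : (PySem.Str.slice code none (some (p.toList.length : Int))).toList
          = code.toList.take p.toList.length := by simp [pysem]
      apply String.ext  -- equality of Strings from equality of toList
      rw [this, ← List.prefix_iff_eq_take.mp h]

-- membership in B's index set, unfolded back to cf pairs
theorem contains_index_iff (cf : List (String × String)) (k v : String) :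
    (PySem.Set.ofList (cf.map (fun q => (pvNorm q.1, q.2)))).contains (k, v) = true
      ↔ ∃ q ∈ cf, pvNorm q.1 = k ∧ q.2 = v := by
  have h : (PySem.Set.ofList (cf.map (fun q => (pvNorm q.1, q.2)))).contains (k, v) = true
      ↔ (k, v) ∈ PySem.Set.ofList (cf.map (fun q => (pvNorm q.1, q.2))) := by
    simp [PySem.Set.contains]
  rw [h, PySem.Set.mem_ofList, List.mem_map]
  constructor
  · rintro ⟨q, hq, heq⟩
    simp only [Prod.mk.injEq] at heq
    exact ⟨q, hq, heq.1, heq.2⟩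
  · rintro ⟨q, hq, h1, h2⟩
    exact ⟨q, hq, by simp [h1, h2]⟩

-- ===== VERDICT (by name: the statement is the Claim_ definition above) =====
theorem matches_classifications_spec : Claim_equal_matches_classifications := by
  intro cf ds _
  show matches_classifications cf ds = matches_classifications_alt cf ds
  rw [Bool.eq_iff_iff]
  simp only [matches_classifications, matches_classifications_alt, pvLoopA_eq_any,
    List.any_flatMap, List.any_map, List.any_eq_true]
  simp only [Function.comp, List.any_eq_true]
  constructor
  · rintro ⟨p, hp, c, hc, q, hq, hmatch⟩
    rw [Bool.and_eq_true, beq_iff_eq] at hmatch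
    obtain ⟨i, hi, hslice⟩ := (exists_slice_eq_iff_startswith (pvCode c) q.2).mpr hmatch.1
    refine ⟨p, hp, c, hc, i, hi, ?_⟩
    rw [contains_index_iff]
    exact ⟨q, hq, hmatch.2.symm, hslice.symm⟩
  · rintro ⟨p, hp, c, hc, i, hi, hmem⟩
    rw [contains_index_iff] at hmem
    obtain ⟨q, hq, hkey, hcode⟩ := hmem
    refine ⟨p, hp, c, hc, q, hq, ?_⟩
    rw [Bool.and_eq_true, beq_iff_eq]
    exact ⟨(exists_slice_eq_iff_startswith (pvCode c) q.2).mp ⟨i, hi, hcode.symm⟩, hkey.symm⟩
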